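-- pv_equiv track=rewrite | github.com/Andresm96/juego-de-dados | logica.py | evaluar_tirada
-- ===== SOURCE A (Python) =====
-- def evaluar_tirada(d1, d2, d3):
--     dados = [d1, d2, d3]
--     repeticiones = max(dados.count(n) for n in dados)
--     if repeticiones == 3:
--         return 3
--     elif repeticiones == 2:
--         return 1
--     else:
--         return 0
-- ===== SOURCE B (Python) =====
-- def evaluar_tirada(d1, d2, d3):
--     if d1 == d2 and d2 == d3:
--         return 3
--     if d1 == d2 or d1 == d3 or d2 == d3:
--         return 1
--     return 0
-- ===== Notes on version B (the rewrite author's own statement) =====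
-- stated objective: simpler
-- what changed: Replaces the count-every-element-then-max pass with direct branching on the pairwise equalities of the three dice.
import Mathlib
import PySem

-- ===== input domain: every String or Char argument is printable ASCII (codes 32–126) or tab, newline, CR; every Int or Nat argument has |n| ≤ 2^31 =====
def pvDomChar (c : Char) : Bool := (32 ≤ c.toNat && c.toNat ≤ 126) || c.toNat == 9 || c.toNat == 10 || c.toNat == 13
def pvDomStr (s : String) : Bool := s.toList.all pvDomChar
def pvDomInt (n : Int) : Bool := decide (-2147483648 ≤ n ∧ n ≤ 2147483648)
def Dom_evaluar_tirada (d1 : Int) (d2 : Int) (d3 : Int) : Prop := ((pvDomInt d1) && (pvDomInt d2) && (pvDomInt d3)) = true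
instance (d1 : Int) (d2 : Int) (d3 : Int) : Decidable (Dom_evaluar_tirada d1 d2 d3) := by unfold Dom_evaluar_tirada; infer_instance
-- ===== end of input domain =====

-- ===== PORT A =====
-- B branches directly on pairwise equalities instead of A's count-and-max pass (simpler).
def evaluar_tirada (d1 : Int) (d2 : Int) (d3 : Int) : Int :=
  let dados : List Int := [d1, d2, d3]
  let repeticiones : Int :=
    (PySem.List.max? (dados.map fun n => (dados.count n : Int)) (fun x => x)).getD 0
  if repeticiones == 3 then 3
  else if repeticiones == 2 then 1
  else 0

-- ===== PORT B =====
def evaluar_tirada_alt (d1 : Int) (d2 : Int) (d3 : Int) : Int :=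
  if d1 == d2 && d2 == d3 then 3
  else if d1 == d2 || d1 == d3 || d2 == d3 then 1
  else 0

-- ===== PRECONDITION & SPEC =====
def Spec_evaluar_tirada (d1 : Int) (d2 : Int) (d3 : Int) (out : Int) : Prop := out = evaluar_tirada_alt d1 d2 d3
instance (d1 : Int) (d2 : Int) (d3 : Int) (out : Int) : Decidable (Spec_evaluar_tirada d1 d2 d3 out) := by unfold Spec_evaluar_tirada; infer_instance

-- ===== CLAIM (what is proved, stated in full; the proofs are below) =====
def Claim_equal_evaluar_tirada : Prop := ∀ (d1 : Int) (d2 : Int) (d3 : Int), Dom_evaluar_tirada d1 d2 d3 → Spec_evaluar_tirada d1 d2 d3 (evaluar_tirada d1 d2 d3)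

-- ===== LEMMAS AND PROOFS =====

-- ===== VERDICT (by name: the statement is the Claim_ definition above) =====
theorem pvIntBeqDef (a b : Int) : (a == b) = decide (a = b) := by
  by_cases h : a = b
  · simp [h]
  · simp [h]

theorem evaluar_tirada_spec : Claim_equal_evaluar_tirada := by
  intro d1 d2 d3 _
  unfold Spec_evaluar_tirada evaluar_tirada evaluar_tirada_alt
  by_cases h12 : d1 = d2 <;> by_cases h13 : d1 = d3 <;> by_cases h23 : d2 = d3 <;>
    simp_all [PySem.List.max?, List.count, List.countP, List.countP.go, pvIntBeqDef, eq_comm]
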